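-- pv_equiv track=rewrite | github.com/rupakbajgain/BC-Calc | excel_parser.py | get_map_d_g
-- ===== SOURCE A (Python) =====
-- def get_map_d_g(depth_data, gamma_data):
--     # Lets combine depth and gammas
--     map_d_g = []
--     for (a, drow) in depth_data:
--         last_gamma = 0
--         for (b, grow) in gamma_data:
--             if grow <= drow:
--                 last_gamma = b
--         map_d_g.append((a, last_gamma))
--     return map_d_g
-- ===== SOURCE B (Python) =====
-- def get_map_d_g(depth_data, gamma_data):
--     # Preprocess gamma_data into a monotonic stack: a later gamma overrides every
--     # earlier one for all drow >= its grow, so entries whose grow is >= a newer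
--     # entry's grow can never be the answer and are popped; the surviving stack is
--     # strictly increasing in grow and each depth is answered by binary search.
--     stack = []
--     for (b, grow) in gamma_data:
--         while stack and stack[-1][0] >= grow:
--             stack.pop()
--         stack.append((grow, b))
--     out = []
--     for (a, drow) in depth_data:
--         lo, hi = 0, len(stack)
--         while lo < hi:
--             mid = (lo + hi) // 2
--             if stack[mid][0] <= drow:
--                 lo = mid + 1
--             else:
--                 hi = mid
--         out.append((a, 0 if lo == 0 else stack[lo - 1][1]))
--     return out
-- ===== Notes on version B (the rewrite author's own statement) =====
-- stated objective: faster
-- what changed: B preprocesses gamma_data once into a monotonic stack (popping entries that a later gamma overrides, leaving grows strictly increasing) and answers each depth row by binary search, instead of A's full inner scan of gamma_data per depth row.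
import Mathlib
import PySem

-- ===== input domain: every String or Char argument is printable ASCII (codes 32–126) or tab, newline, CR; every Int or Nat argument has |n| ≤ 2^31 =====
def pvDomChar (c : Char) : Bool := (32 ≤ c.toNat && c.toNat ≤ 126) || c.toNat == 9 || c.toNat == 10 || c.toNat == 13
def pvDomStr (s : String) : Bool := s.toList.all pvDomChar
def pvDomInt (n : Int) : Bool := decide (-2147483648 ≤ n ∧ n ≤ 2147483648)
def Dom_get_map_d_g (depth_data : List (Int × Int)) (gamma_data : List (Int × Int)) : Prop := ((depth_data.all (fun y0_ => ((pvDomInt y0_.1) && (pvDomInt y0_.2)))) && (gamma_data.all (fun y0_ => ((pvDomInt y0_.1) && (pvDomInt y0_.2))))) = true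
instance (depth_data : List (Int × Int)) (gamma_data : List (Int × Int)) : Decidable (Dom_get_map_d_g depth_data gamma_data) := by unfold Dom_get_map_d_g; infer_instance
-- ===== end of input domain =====

-- B builds a monotonic stack from gamma_data once (later gammas override earlier ones with
-- larger-or-equal grow) and binary-searches it per depth row, replacing A's inner scan.
-- ===== PORT A =====
-- literal port of A: append-accumulator loop over depth_data, full inner fold over gamma_data
def get_map_d_g (depth_data : List (Int × Int)) (gamma_data : List (Int × Int)) : List (Int × Int) :=
  depth_data.foldl (fun map_d_g p =>
    let a := p.1
    let drow := p.2
    let last_gamma := gamma_data.foldl (fun acc q => if q.2 ≤ drow then q.1 else acc) 0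
    map_d_g ++ [(a, last_gamma)]) []

-- ===== PORT B =====
-- the stack is represented top-first (head = Python's stack[-1]); pvPop is the
-- 'while stack and stack[-1][0] >= grow: stack.pop()' loop
def pvPop (g : Int) : List (Int × Int) → List (Int × Int)
  | [] => []
  | e :: rest => if g ≤ e.1 then pvPop g rest else e :: rest

-- the 'while lo < hi' binary-search loop; lo/hi are nonnegative Python ints, kept as Nat;
-- structural recursion on a fuel ≥ hi - lo, which only bounds the iteration count
-- (stack[mid] is always in range in Python, ported as getD)
def pvBS (st : List (Int × Int)) (d : Int) : Nat → Nat → Nat → Nat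
  | 0, lo, _ => lo
  | fuel + 1, lo, hi =>
    if lo < hi then
      let mid := (lo + hi) / 2
      if (st.getD mid (0, 0)).1 ≤ d then pvBS st d fuel (mid + 1) hi else pvBS st d fuel lo mid
    else lo

def get_map_d_g_alt (depth_data : List (Int × Int)) (gamma_data : List (Int × Int)) : List (Int × Int) :=
  let revStack := gamma_data.foldl (fun stack q => (q.2, q.1) :: pvPop q.2 stack) []
  let st := revStack.reverse
  depth_data.foldl (fun out p =>
    let lo := pvBS st p.2 st.length 0 st.length
    out ++ [(p.1, if lo = 0 then 0 else (st.getD (lo - 1) (0, 0)).2)]) []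

-- ===== PRECONDITION & SPEC =====
def Spec_get_map_d_g (depth_data : List (Int × Int)) (gamma_data : List (Int × Int)) (out : List (Int × Int)) : Prop := out = get_map_d_g_alt depth_data gamma_data
instance (depth_data : List (Int × Int)) (gamma_data : List (Int × Int)) (out : List (Int × Int)) : Decidable (Spec_get_map_d_g depth_data gamma_data out) := by unfold Spec_get_map_d_g; infer_instance

-- ===== CLAIM (what is proved, stated in full; the proofs are below) =====
def Claim_equal_get_map_d_g : Prop := ∀ (depth_data : List (Int × Int)) (gamma_data : List (Int × Int)), Dom_get_map_d_g depth_data gamma_data → Spec_get_map_d_g depth_data gamma_data (get_map_d_g depth_data gamma_data)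

-- ===== LEMMAS AND PROOFS =====

-- value of the (top-first) stack at depth d: first entry with grow ≤ d, else 0
def pvEval (r : List (Int × Int)) (d : Int) : Int :=
  ((r.find? (fun e => decide (e.1 ≤ d))).map Prod.snd).getD 0

-- popping entries with grow ≥ g does not change the value at any d < g
theorem pvEval_pop (r : List (Int × Int)) (g d : Int) (hd : ¬ g ≤ d) :
    pvEval (pvPop g r) d = pvEval r d := by
  induction r with
  | nil => rfl
  | cons e rest ih =>
    by_cases h : g ≤ e.1
    · have hne : ¬ e.1 ≤ d := by omega
      have h2 : pvEval (e :: rest) d = pvEval rest d := by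
        simp [pvEval, hne]
      simp only [pvPop, h, if_true, ih, h2]
    · simp [pvPop, h]

-- pushing (g,b) updates the value exactly like one gamma entry does in A's fold
theorem pvEval_push (r : List (Int × Int)) (g b d : Int) :
    pvEval ((g, b) :: pvPop g r) d = if g ≤ d then b else pvEval r d := by
  by_cases h : g ≤ d
  · simp [pvEval, h]
  · simp only [pvEval, List.find?_cons]
    have : ¬ ((g, b).1 ≤ d) := h
    simp only [this, decide_false]
    exact pvEval_pop r g d h
-- A's inner fold equals the value of the built stack
theorem foldA_eq_eval (l : List (Int × Int)) (r : List (Int × Int)) (d : Int) :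
    l.foldl (fun acc q => if q.2 ≤ d then q.1 else acc) (pvEval r d)
      = pvEval (l.foldl (fun stack q => (q.2, q.1) :: pvPop q.2 stack) r) d := by
  induction l generalizing r with
  | nil => rfl
  | cons x t ih =>
    simp only [List.foldl_cons]
    rw [← pvEval_push r x.2 x.1 d]
    exact ih _

-- the stack is strictly decreasing in grow from the top
theorem pop_lt (r : List (Int × Int)) (g : Int)
    (hr : r.Pairwise (fun x y => y.1 < x.1)) :
    ∀ e ∈ pvPop g r, e.1 < g := by
  induction r with
  | nil => intro e he; simp [pvPop] at he
  | cons x rest ih =>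
    intro e he
    by_cases h : g ≤ x.1
    · exact ih hr.of_cons e (by simpa [pvPop, h] using he)
    · simp only [pvPop, h] at he
      rcases List.mem_cons.mp he with rfl | hm
      · omega
      · have := (List.pairwise_cons.mp hr).1 e hm; omega

theorem pvPop_sublist (g : Int) (r : List (Int × Int)) : (pvPop g r).Sublist r := by
  induction r with
  | nil => exact List.Sublist.refl _
  | cons a b ihs =>
    by_cases h : g ≤ a.1
    · simpa [pvPop, h] using ihs.cons a
    · simp [pvPop, h]

theorem stack_sorted (l : List (Int × Int)) (r : List (Int × Int))
    (hr : r.Pairwise (fun x y => y.1 < x.1)) :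
    (l.foldl (fun stack q => (q.2, q.1) :: pvPop q.2 stack) r).Pairwise
      (fun x y => y.1 < x.1) := by
  induction l generalizing r with
  | nil => exact hr
  | cons x t ih =>
    refine ih _ (List.pairwise_cons.mpr ⟨pop_lt r x.2 hr, ?_⟩)
    exact hr.sublist (pvPop_sublist x.2 r)

-- binary search on a split list t ++ u (all of t satisfies grow ≤ d, all of u does not)
-- returns t.length
theorem pvBS_eq (st t u : List (Int × Int)) (d : Int)
    (hst : st = t ++ u)
    (ht : ∀ e ∈ t, e.1 ≤ d) (hu : ∀ e ∈ u, ¬ e.1 ≤ d)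
    (fuel lo hi : Nat) (hf : hi - lo ≤ fuel) (hlo : lo ≤ t.length) (hhi : t.length ≤ hi)
    (hhi' : hi ≤ st.length) :
    pvBS st d fuel lo hi = t.length := by
  induction fuel generalizing lo hi with
  | zero => simp only [pvBS]; omega
  | succ fuel ih =>
  have hlen : st.length = t.length + u.length := by simp [hst]
  by_cases h : lo < hi
  · rw [pvBS]
    simp only [h, if_true]
    set mid := (lo + hi) / 2 with hmid
    have hm1 : lo ≤ mid := by omega
    have hm2 : mid < hi := by omega
    have hmlt : mid < st.length := by omega
    by_cases hc : (st.getD mid (0, 0)).1 ≤ d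
    · simp only [hc, if_true]
      have hmt : mid < t.length := by
        by_contra hge
        have h1 : mid - t.length < u.length := by omega
        have heq : st.getD mid (0,0) = u[mid - t.length]'h1 := by
          rw [hst, List.getD_eq_getElem?_getD, List.getElem?_append_right (by omega),
            List.getElem?_eq_getElem h1]; rfl
        exact hu _ (List.getElem_mem _) (heq ▸ hc)
      exact ih (mid+1) hi (by omega) (by omega) hhi hhi'
    · simp only [hc, if_false]
      have hmt : t.length ≤ mid := by
        by_contra hc2
        have hlt : mid < t.length := by omega
        have heq : st.getD mid (0,0) = t[mid]'hlt := by
          rw [hst, List.getD_eq_getElem?_getD, List.getElem?_append_left hlt,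
            List.getElem?_eq_getElem hlt]; rfl
        exact hc (heq ▸ ht _ (List.getElem_mem _))
      exact ih lo mid (by omega) hlo hmt (by omega)
  · rw [pvBS]; simp only [h, if_false]; omega

-- the stack's value at d, read off via the t/u split of its reverse
theorem pvEval_split (t u : List (Int × Int)) (d : Int)
    (ht : ∀ e ∈ t, e.1 ≤ d) (hu : ∀ e ∈ u, ¬ e.1 ≤ d) :
    pvEval ((t ++ u).reverse) d
      = if t.length = 0 then 0 else ((t ++ u).getD (t.length - 1) (0,0)).2 := by
  unfold pvEval
  rw [List.reverse_append, List.find?_append]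
  have hnone : u.reverse.find? (fun e => decide (e.1 ≤ d)) = none := by
    rw [List.find?_eq_none]
    intro e he; simpa using hu e (List.mem_reverse.mp he)
  rw [hnone]
  cases t using List.reverseRecOn with
  | nil => simp
  | append_singleton t' x _ =>
    have hx : x ∈ t' ++ [x] := by simp
    simp only [List.reverse_append, List.reverse_singleton, List.singleton_append,
      List.find?_cons, ht x hx, decide_true, Option.none_or]
    have hlen : (t' ++ [x]).length = t'.length + 1 := by simp
    rw [hlen]
    simp only [Nat.add_sub_cancel, Nat.add_one_ne_zero, if_false]
    have : ((t' ++ [x]) ++ u).getD t'.length (0,0) = x := by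
      rw [List.getD_eq_getElem?_getD, List.append_assoc,
        List.getElem?_append_right (by simp), ]
      simp
    rw [this]
    rfl

-- given a strictly-increasing st, split it at d with takeWhile/dropWhile
theorem split_of_sorted (st : List (Int × Int)) (d : Int)
    (hs : st.Pairwise (fun x y => x.1 < y.1)) :
    ∃ t u, st = t ++ u ∧ (∀ e ∈ t, e.1 ≤ d) ∧ (∀ e ∈ u, ¬ e.1 ≤ d) := by
  refine ⟨st.takeWhile (fun e => decide (e.1 ≤ d)), st.dropWhile (fun e => decide (e.1 ≤ d)),
    (List.takeWhile_append_dropWhile).symm, ?_, ?_⟩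
  · intro e he; simpa using List.mem_takeWhile_imp he
  · intro e he
    rcases hd : st.dropWhile (fun e => decide (e.1 ≤ d)) with _ | ⟨h0, rest⟩
    · rw [hd] at he; simp at he
    · have hh0 : ¬ h0.1 ≤ d := by
        have := List.head?_dropWhile_not (fun e => decide (e.1 ≤ d)) st
        rw [hd] at this; simpa using this
      rw [hd] at he
      rcases List.mem_cons.mp he with rfl | hm
      · exact hh0
      · -- e is after h0 in st, so h0.1 < e.1
        have hsub : (h0 :: rest).Sublist st := hd ▸ List.dropWhile_sublist _
        have hp : (h0 :: rest).Pairwise (fun x y => x.1 < y.1) := hs.sublist hsub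
        have := (List.pairwise_cons.mp hp).1 e hm
        omega

-- per-depth agreement: A's inner fold = B's binary-search lookup
theorem row_eq (gamma_data : List (Int × Int)) (d : Int) :
    gamma_data.foldl (fun acc q => if q.2 ≤ d then q.1 else acc) 0
      = (let st := (gamma_data.foldl (fun stack q => (q.2, q.1) :: pvPop q.2 stack) []).reverse
         let lo := pvBS st d st.length 0 st.length
         if lo = 0 then 0 else (st.getD (lo - 1) (0, 0)).2) := by
  set rev := gamma_data.foldl (fun stack q => (q.2, q.1) :: pvPop q.2 stack) [] with hrev
  have hA : gamma_data.foldl (fun acc q => if q.2 ≤ d then q.1 else acc) 0 = pvEval rev d := by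
    have := foldA_eq_eval gamma_data [] d
    simpa [pvEval] using this
  have hsortRev : rev.Pairwise (fun x y => y.1 < x.1) := stack_sorted gamma_data [] (by simp)
  have hsort : rev.reverse.Pairwise (fun x y => x.1 < y.1) := by
    rw [List.pairwise_reverse]; exact hsortRev
  obtain ⟨t, u, hst, ht, hu⟩ := split_of_sorted rev.reverse d hsort
  have hbs : pvBS rev.reverse d rev.reverse.length 0 rev.reverse.length = t.length :=
    pvBS_eq _ t u d hst ht hu _ 0 _ (by omega) (by omega) (by simp [hst]) (by omega)
  have heval : pvEval rev d = if t.length = 0 then 0 else ((t ++ u).getD (t.length - 1) (0,0)).2 := by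
    have : rev = (t ++ u).reverse := by rw [← hst]; simp
    rw [this]; exact pvEval_split t u d ht hu
  rw [hst] at hbs
  rw [hA, heval, hst]
  simp only [hbs]

-- ===== VERDICT (by name: the statement is the Claim_ definition above) =====
theorem get_map_d_g_spec : Claim_equal_get_map_d_g := by
  intro depth_data gamma_data _
  unfold Spec_get_map_d_g get_map_d_g get_map_d_g_alt
  simp only []
  rw [PySem.List.foldl_append_singleton_eq_map, PySem.List.foldl_append_singleton_eq_map]
  exact List.map_congr_left fun p _ => by rw [row_eq]
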